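-- pv_equiv track=rewrite | github.com/stuartcmehrens/semgrep-pipeline | reporting/src/semgrep_findings_to_csv_html_pdf_all_repos_filter_tag.py | count_severity_and_state
-- ===== SOURCE A (Python) =====
-- def count_severity_and_state(data):
--     # Initialize counters for each severity level and each state within that level
--     counts = {
--         'high': {'muted': 0, 'fixed': 0, 'removed': 0, 'unresolved': 0},
--         'medium': {'muted': 0, 'fixed': 0, 'removed': 0, 'unresolved': 0},
--         'low': {'muted': 0, 'fixed': 0, 'removed': 0, 'unresolved': 0}
--     }
--
--     # Iterate through each item in the data
--     for item in data:
--         severity = item.get('severity')  # Get the severity of the current item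
--         state = item.get('state')  # Get the state of the current item
--
--         # Check if the severity and state are recognized, then increment the appropriate counter
--         if severity in counts and state in counts[severity]:
--             counts[severity][state] += 1
--
--     return counts
-- ===== SOURCE B (Python) =====
-- def count_severity_and_state(data):
--     # Phase 1: tally every (severity, state) pair seen, recognized or not.
--     tally = {}
--     for item in data:
--         key = (item.get('severity'), item.get('state'))
--         tally[key] = tally.get(key, 0) + 1
--     # Phase 2: read the fixed grid of cells out of the tally.
--     severities = ('high', 'medium', 'low')
--     states = ('muted', 'fixed', 'removed', 'unresolved')
--     return {sev: {st: tally.get((sev, st), 0) for st in states} for sev in severities}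
-- ===== Notes on version B (the rewrite author's own statement) =====
-- stated objective: idiomatic
-- what changed: Replaces A's guard-and-increment single pass into a pre-built nested dict by a two-phase shape: one pass tallying every (severity, state) pair into a flat dict, then a second phase that constructs the nested result by reading the twelve known cells out of the tally (unrecognized pairs are tallied but never read).
import Mathlib
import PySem

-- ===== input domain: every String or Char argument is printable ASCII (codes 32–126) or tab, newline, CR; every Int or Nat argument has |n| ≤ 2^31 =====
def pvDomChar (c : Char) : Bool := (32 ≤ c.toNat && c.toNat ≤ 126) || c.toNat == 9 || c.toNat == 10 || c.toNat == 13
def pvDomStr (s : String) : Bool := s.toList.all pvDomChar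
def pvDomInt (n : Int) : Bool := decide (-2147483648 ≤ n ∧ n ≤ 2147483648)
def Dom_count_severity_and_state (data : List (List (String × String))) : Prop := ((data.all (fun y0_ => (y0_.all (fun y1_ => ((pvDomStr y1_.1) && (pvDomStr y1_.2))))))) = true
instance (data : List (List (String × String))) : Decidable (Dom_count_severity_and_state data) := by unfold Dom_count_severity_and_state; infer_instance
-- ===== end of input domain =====

-- B replaces A's guard-and-increment pass over a pre-built nested dict by a two-phase shape
-- (tally every (severity, state) pair, then read out the fixed 3×4 grid); same return value, same O(n) cost.

-- ===== PORT A =====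
-- one loop iteration of A: guard on recognized severity/state, then increment that nested cell
def count_severity_and_state_step (counts : PySem.Dict String (PySem.Dict String Int))
    (item : List (String × String)) : PySem.Dict String (PySem.Dict String Int) :=
  let severity := (PySem.Dict.mk item).get? "severity"
  let state := (PySem.Dict.mk item).get? "state"
  -- 'if severity in counts and state in counts[severity]': a None key is never in counts
  match severity with
  | none => counts
  | some sev =>
    match counts.get? sev with
    | none => counts
    | some inner =>
      match state with
      | none => counts
      | some st =>
        if inner.contains st then
          -- counts[severity][state] += 1 (in-place update of the inner dict keeps positions)
          counts.insert sev (inner.insert st (inner.getD st 0 + 1))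
        else counts

def count_severity_and_state (data : List (List (String × String))) : List (String × List (String × Int)) :=
  let init : PySem.Dict String (PySem.Dict String Int) := PySem.Dict.mk
    [("high", PySem.Dict.mk [("muted", 0), ("fixed", 0), ("removed", 0), ("unresolved", 0)]),
     ("medium", PySem.Dict.mk [("muted", 0), ("fixed", 0), ("removed", 0), ("unresolved", 0)]),
     ("low", PySem.Dict.mk [("muted", 0), ("fixed", 0), ("removed", 0), ("unresolved", 0)])]
  let counts := data.foldl count_severity_and_state_step init
  counts.items.map (fun kv => (kv.1, kv.2.items))

-- ===== PORT B =====
def count_severity_and_state_alt (data : List (List (String × String))) : List (String × List (String × Int)) :=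
  -- phase 1: tally every (severity, state) pair
  let tally : PySem.Dict (Option String × Option String) Int :=
    data.foldl (fun t item =>
      let key := ((PySem.Dict.mk item).get? "severity", (PySem.Dict.mk item).get? "state")
      t.insert key (t.getD key 0 + 1)) PySem.Dict.empty
  -- phase 2: read the fixed grid of cells out of the tally
  ["high", "medium", "low"].map (fun sev =>
    (sev, ["muted", "fixed", "removed", "unresolved"].map (fun st =>
      (st, tally.getD (some sev, some st) 0))))

-- ===== PRECONDITION & SPEC =====
def Spec_count_severity_and_state (data : List (List (String × String))) (out : List (String × List (String × Int))) : Prop := out = count_severity_and_state_alt data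
instance (data : List (List (String × String))) (out : List (String × List (String × Int))) : Decidable (Spec_count_severity_and_state data out) := by unfold Spec_count_severity_and_state; infer_instance

-- ===== CLAIM (what is proved, stated in full; the proofs are below) =====
def Claim_equal_count_severity_and_state : Prop := ∀ (data : List (List (String × String))), Dom_count_severity_and_state data → Spec_count_severity_and_state data (count_severity_and_state data)

-- ===== LEMMAS AND PROOFS =====

-- the (severity, state) pair of one item
def pvKey (item : List (String × String)) : Option String × Option String :=
  ((PySem.Dict.mk item).get? "severity", (PySem.Dict.mk item).get? "state")

-- the nested grid with cell (s, t) holding c s t; A's accumulator always has this shape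
def pvGrid (c : String → String → Int) : PySem.Dict String (PySem.Dict String Int) :=
  PySem.Dict.mk
    [("high", PySem.Dict.mk [("muted", c "high" "muted"), ("fixed", c "high" "fixed"), ("removed", c "high" "removed"), ("unresolved", c "high" "unresolved")]),
     ("medium", PySem.Dict.mk [("muted", c "medium" "muted"), ("fixed", c "medium" "fixed"), ("removed", c "medium" "removed"), ("unresolved", c "medium" "unresolved")]),
     ("low", PySem.Dict.mk [("muted", c "low" "muted"), ("fixed", c "low" "fixed"), ("removed", c "low" "removed"), ("unresolved", c "low" "unresolved")])]

-- A's step on a grid increments exactly the cell matching the item's key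
set_option maxHeartbeats 2000000 in
theorem pvGrid_step' (c : String → String → Int) (item : List (String × String))
    (sv st : Option String) (h : pvKey item = (sv, st)) :
    count_severity_and_state_step (pvGrid c) item =
      pvGrid (fun s t => c s t + if (sv, st) == (some s, some t) then 1 else 0) := by
  have h1 : (PySem.Dict.mk item).get? "severity" = sv := congrArg Prod.fst h
  have h2 : (PySem.Dict.mk item).get? "state" = st := congrArg Prod.snd h
  unfold count_severity_and_state_step
  simp only [h1, h2]
  match sv, st with
  | none, t? => simp [pvGrid]
  | some s, none =>
      rcases (show "high" = s ∨ "medium" = s ∨ "low" = s ∨ (¬"high" = s ∧ ¬"medium" = s ∧ ¬"low" = s) by tauto) with e|e|e|⟨e1,e2,e3⟩ <;>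
        subst_vars <;> simp [pvGrid, PySem.Dict.get?, beq_iff_eq, *]
  | some s, some t =>
      rcases (show "high" = s ∨ "medium" = s ∨ "low" = s ∨ (¬"high" = s ∧ ¬"medium" = s ∧ ¬"low" = s) by tauto) with e|e|e|⟨e1,e2,e3⟩ <;>
      rcases (show "muted" = t ∨ "fixed" = t ∨ "removed" = t ∨ "unresolved" = t ∨ (¬"muted" = t ∧ ¬"fixed" = t ∧ ¬"removed" = t ∧ ¬"unresolved" = t) by tauto) with f|f|f|f|⟨f1,f2,f3,f4⟩ <;>
      subst_vars <;>
      simp [pvGrid, PySem.Dict.get?, PySem.Dict.contains, PySem.Dict.insert, PySem.Dict.getD, beq_iff_eq, *] <;>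
      first
        | exact ⟨Ne.symm f1, Ne.symm f2, Ne.symm f3, Ne.symm f4⟩
        | exact ⟨Ne.symm e1, Ne.symm e2, Ne.symm e3⟩
        | tauto

theorem pvGrid_congr (c c' : String → String → Int) (h : ∀ s t, c s t = c' s t) :
    pvGrid c = pvGrid c' := by
  simp only [pvGrid, h]

-- A's whole fold: each grid cell ends up initial value + number of items with that key
theorem pvGrid_foldl (data : List (List (String × String))) (c : String → String → Int) :
    data.foldl count_severity_and_state_step (pvGrid c) =
      pvGrid (fun s t => c s t + ((data.map pvKey).count (some s, some t) : Int)) := by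
  induction data generalizing c with
  | nil => simp [pvGrid]
  | cons x xs ih =>
      rw [List.foldl_cons, pvGrid_step' c x (pvKey x).1 (pvKey x).2 rfl, ih]
      apply pvGrid_congr
      intro s t
      simp only [List.map_cons, List.count_cons]
      by_cases hx : pvKey x = (some s, some t) <;>
        simp [hx, beq_iff_eq] <;> push_cast <;> ring

theorem pv_main (data : List (List (String × String))) :
    count_severity_and_state data = count_severity_and_state_alt data := by
  have key : ∀ (sv st' : String),
      (data.foldl (fun t item => t.insert (pvKey item) (t.getD (pvKey item) 0 + 1))
        (PySem.Dict.empty : PySem.Dict (Option String × Option String) Int)).getD (some sv, some st') 0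
        = ((data.map pvKey).count (some sv, some st') : Int) := by
    intro sv st'
    rw [← List.foldl_map (f := pvKey) (g := fun (d : PySem.Dict (Option String × Option String) Int) k => d.insert k (d.getD k 0 + 1))]
    simp [PySem.Dict.getD_foldl_insert_add_one]
  show (data.foldl count_severity_and_state_step (pvGrid fun _ _ => 0)).items.map (fun kv => (kv.1, kv.2.items)) =
       ["high","medium","low"].map (fun sev => (sev, ["muted","fixed","removed","unresolved"].map (fun st =>
         (st, (data.foldl (fun t item => t.insert (pvKey item) (t.getD (pvKey item) 0 + 1))
           (PySem.Dict.empty : PySem.Dict (Option String × Option String) Int)).getD (some sev, some st) 0))))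
  rw [pvGrid_foldl]
  simp only [key]
  simp [pvGrid, PySem.Dict.items]

-- ===== VERDICT (by name: the statement is the Claim_ definition above) =====
theorem count_severity_and_state_spec : Claim_equal_count_severity_and_state := by
  intro data _
  unfold Spec_count_severity_and_state
  exact pv_main data
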